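-- pv_equiv track=rewrite | github.com/tvrlexe/Machine-Learning-00 | VoyageAI/data_pipeline.py | get_seasonal_ranges
-- ===== SOURCE A (Python) =====
-- def get_seasonal_ranges(country_seasons):
--     seasons = list(country_seasons.items())
--     seasonal_ranges = {}
--
--     for i in range(len(seasons)):
--         season_name, start_date = seasons[i]
--
--         if i < len(seasons) - 1:
--             _, end_date = seasons[i + 1]
--         else:
--             _, end_date = seasons[0]
--             end_date = end_date.replace("2024", "2025")
--
--         seasonal_ranges[season_name] = {
--             'start': start_date,
--             'end': end_date
--         }
--
--     return seasonal_ranges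
-- ===== SOURCE B (Python) =====
-- def get_seasonal_ranges(country_seasons):
--     items = list(country_seasons.items())
--     if not items:
--         return {}
--     rev = []
--     nxt = items[0][1].replace("2024", "2025")
--     for name, start in reversed(items):
--         rev.append((name, {'start': start, 'end': nxt}))
--         nxt = start
--     return dict(reversed(rev))
-- ===== Notes on version B (the rewrite author's own statement) =====
-- stated objective: alternative
-- what changed: Replaces A's forward index loop with its i<len-1 lookahead branch by a single backward traversal carrying the next season's start in an accumulator (seeded with the wrapped first start), building the entry list back-to-front and reversing it at the end.
import Mathlib
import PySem

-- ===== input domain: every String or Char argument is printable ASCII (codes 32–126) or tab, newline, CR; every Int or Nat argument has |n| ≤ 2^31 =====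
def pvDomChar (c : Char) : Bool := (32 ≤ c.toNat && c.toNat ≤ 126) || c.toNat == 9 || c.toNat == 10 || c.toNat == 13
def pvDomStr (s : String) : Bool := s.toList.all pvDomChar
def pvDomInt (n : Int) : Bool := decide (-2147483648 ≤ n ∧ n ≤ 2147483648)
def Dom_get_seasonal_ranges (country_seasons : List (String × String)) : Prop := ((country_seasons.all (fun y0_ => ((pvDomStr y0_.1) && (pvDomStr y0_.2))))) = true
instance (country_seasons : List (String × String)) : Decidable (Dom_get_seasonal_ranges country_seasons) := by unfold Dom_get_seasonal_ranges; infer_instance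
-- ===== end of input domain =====

-- B replaces A's forward index loop (with its i < len-1 lookahead branch) by one backward
-- traversal carrying the next season's start in an accumulator (alternative; same cost).

-- ===== PORT A =====
-- 'country_seasons' is a Python dict: both ports read it through PySem.Dict.ofList.
-- seasons[i] / seasons[i+1] / seasons[0] are ported with pyGetD (every index the loop
-- uses is in range, so this is exact).
def get_seasonal_ranges (country_seasons : List (String × String)) : List (String × List (String × String)) :=
  let seasons := (PySem.Dict.ofList country_seasons).items
  let ranges := (PySem.List.pyRange 0 (PySem.List.len seasons) 1).foldl
    (fun (d : PySem.Dict String (List (String × String))) i =>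
      let p := PySem.List.pyGetD seasons i ("", "")
      let end_date :=
        if i < (PySem.List.len seasons) - 1 then
          (PySem.List.pyGetD seasons (i + 1) ("", "")).2
        else
          PySem.Str.replace (PySem.List.pyGetD seasons 0 ("", "")).2 "2024" "2025"
      d.insert p.1 [("start", p.2), ("end", end_date)])
    PySem.Dict.empty
  ranges.items

-- ===== PORT B =====
-- the for-loop over reversed(items) with the appended 'rev' list and the carried 'nxt'
-- is ported as a foldl over items.reverse whose state is the pair (nxt, rev);
-- dict(reversed(rev)) is Dict.ofList rev.reverse.
def get_seasonal_ranges_alt (country_seasons : List (String × String)) : List (String × List (String × String)) :=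
  let items := (PySem.Dict.ofList country_seasons).items
  match items with
  | [] => []
  | first :: _ =>
    let r := items.reverse.foldl
      (fun (st : String × List (String × List (String × String))) p =>
        (p.2, st.2 ++ [(p.1, [("start", p.2), ("end", st.1)])]))
      (PySem.Str.replace first.2 "2024" "2025", [])
    (PySem.Dict.ofList r.2.reverse).items

-- ===== PRECONDITION & SPEC =====
def Spec_get_seasonal_ranges (country_seasons : List (String × String)) (out : List (String × List (String × String))) : Prop := out = get_seasonal_ranges_alt country_seasons
instance (country_seasons : List (String × String)) (out : List (String × List (String × String))) : Decidable (Spec_get_seasonal_ranges country_seasons out) := by unfold Spec_get_seasonal_ranges; infer_instance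

-- ===== CLAIM (what is proved, stated in full; the proofs are below) =====
def Claim_equal_get_seasonal_ranges : Prop := ∀ (country_seasons : List (String × String)), Dom_get_seasonal_ranges country_seasons → Spec_get_seasonal_ranges country_seasons (get_seasonal_ranges country_seasons)

-- ===== LEMMAS AND PROOFS =====

-- canonical pairwise form both ports are reduced to: each name with its start and the
-- next element's start, the last one getting w
def pvPW (s : List (String × String)) (w : String) : List (String × List (String × String)) :=
  match s with
  | [] => []
  | [p] => [(p.1, [("start", p.2), ("end", w)])]
  | p :: q :: rest => (p.1, [("start", p.2), ("end", q.2)]) :: pvPW (q :: rest) w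

theorem pvPW_map_fst (s : List (String × String)) (w : String) :
    (pvPW s w).map Prod.fst = s.map Prod.fst := by
  induction s with
  | nil => rfl
  | cons p rest ih =>
    cases rest with
    | nil => rfl
    | cons q rs => simp only [pvPW, List.map_cons]; exact congrArg _ (by simpa using ih)


theorem pvPW_length (s : List (String × String)) (w : String) :
    (pvPW s w).length = s.length := by
  induction s with
  | nil => rfl
  | cons p rest ih =>
    cases rest with
    | nil => rfl
    | cons q rs => simpa [pvPW] using ih

theorem pvPW_getElem (s : List (String × String)) (w : String) (i : Nat)
    (h1 : i < (pvPW s w).length) (h2 : i < s.length) :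
    (pvPW s w)[i] = (s[i].1, [("start", s[i].2),
      ("end", if h : i + 1 < s.length then s[i + 1].2 else w)]) := by
  induction s generalizing i with
  | nil => simp at h2
  | cons p rest ih =>
    cases rest with
    | nil =>
      cases i with
      | zero => simp [pvPW]
      | succ j => simp at h2
    | cons q rs =>
      cases i with
      | zero => simp [pvPW]
      | succ j =>
        simp only [pvPW, List.getElem_cons_succ]
        rw [ih j (by simpa [pvPW_length] using h2) (by simpa using h2)]
        simp only [List.length_cons, List.getElem_cons_succ]
        split_ifs with ha hb
        all_goals first | rfl | omega

-- A's indexed map equals the pairwise form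
theorem mapA_eq_pw (q : String × String) (qs : List (String × String)) :
    (PySem.List.pyRange 0 (PySem.List.len (q :: qs)) 1).map (fun i =>
        ((PySem.List.pyGetD (q :: qs) i ("", "")).1,
         [("start", (PySem.List.pyGetD (q :: qs) i ("", "")).2),
          ("end", if i < PySem.List.len (q :: qs) - 1 then
                    (PySem.List.pyGetD (q :: qs) (i + 1) ("", "")).2
                  else
                    PySem.Str.replace (PySem.List.pyGetD (q :: qs) 0 ("", "")).2 "2024" "2025")]))
    = pvPW (q :: qs) (PySem.Str.replace q.2 "2024" "2025") := by
  apply List.ext_getElem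
  · simp [PySem.List.length_pyRange_one, PySem.List.len_eq, pvPW_length]
  · intro i h1 h2
    have hi1 : i < qs.length + 1 := by
      simpa [PySem.List.length_pyRange_one, PySem.List.len_eq] using h1
    have hcast : ((i : Int) + 1) = ((i + 1 : Nat) : Int) := by push_cast; ring
    simp only [List.getElem_map, PySem.List.getElem_pyRange_one, zero_add,
      PySem.List.pyGetD_natCast, PySem.List.len_eq]
    rw [pvPW_getElem]
    by_cases hi : i < qs.length
    · have hlt : (i : Int) < ((q :: qs).length : Int) - 1 := by
        simp only [List.length_cons]; omega
      rw [if_pos hlt, hcast, PySem.List.pyGetD_natCast,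
        dif_pos (show i + 1 < (q :: qs).length by simpa using Nat.succ_lt_succ hi)]
      have e1 : (q :: qs).getD i ("", "") = (q :: qs)[i] := List.getD_eq_getElem _ _ (by simpa using hi1)
      have e2 : (q :: qs).getD (i + 1) ("", "") = (q :: qs)[i + 1] := List.getD_eq_getElem _ _ (by simpa using Nat.succ_lt_succ hi)
      rw [e1, e2]
    · have hieq : i = qs.length := by omega
      have hlt : ¬ ((i : Int) < ((q :: qs).length : Int) - 1) := by
        simp only [List.length_cons]; omega
      rw [if_neg hlt, dif_neg (by simp [hieq])]
      have e1 : (q :: qs).getD i ("", "") = (q :: qs)[i] := List.getD_eq_getElem _ _ (by simpa using hi1)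
      rw [e1]
      simp [hieq]

-- B's reverse fold equals the pairwise form (state = (carried next-start, built list))
theorem foldr_eq_pw (s : List (String × String)) (w : String) :
    s.foldr (fun p (st : String × List (String × List (String × String))) =>
        (p.2, st.2 ++ [(p.1, [("start", p.2), ("end", st.1)])])) (w, [])
    = ((match s with | [] => w | p :: _ => p.2), (pvPW s w).reverse) := by
  induction s with
  | nil => rfl
  | cons p rest ih =>
    cases rest with
    | nil => rfl
    | cons q rs =>
      simp only [List.foldr_cons] at ih ⊢
      have hsnd := congrArg Prod.snd ih
      dsimp only at hsnd ⊢
      rw [hsnd]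
      simp [pvPW]

-- ===== VERDICT (by name: the statement is the Claim_ definition above) =====
-- Dict.ofList of a list with distinct keys returns exactly that list as items
theorem items_ofList_of_nodup (l : List (String × List (String × String)))
    (h : (l.map Prod.fst).Nodup) : (PySem.Dict.ofList l).items = l := by
  have e : PySem.Dict.ofList l = l.foldl (fun d p => d.insert p.1 p.2) PySem.Dict.empty := rfl
  rw [e]
  have := PySem.Dict.items_foldl_insert_fresh l Prod.fst Prod.snd PySem.Dict.empty
    (fun a _ => by simp [PySem.Dict.contains_empty]) h
  simpa [PySem.Dict.items] using this

-- ===== VERDICT (by name: the statement is the Claim_ definition above) =====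
theorem get_seasonal_ranges_spec : Claim_equal_get_seasonal_ranges := by
  intro cs _
  unfold Spec_get_seasonal_ranges get_seasonal_ranges get_seasonal_ranges_alt
  dsimp only
  have hnd : ((PySem.Dict.ofList cs).keys).Nodup := PySem.Dict.nodup_keys_ofList cs
  simp only [PySem.Dict.keys] at hnd
  generalize (PySem.Dict.ofList cs).items = s at hnd ⊢
  cases s with
  | nil => rfl
  | cons q qs =>
    -- A side: the insert loop over fresh distinct keys appends, giving the indexed map
    have hfreshA : ∀ a ∈ PySem.List.pyRange 0 (PySem.List.len (q :: qs)) 1,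
        (PySem.Dict.empty : PySem.Dict String (List (String × String))).contains
          ((PySem.List.pyGetD (q :: qs) a ("", "")).1) = false := by
      intro a _; simp [PySem.Dict.contains_empty]
    have hknodA : ((PySem.List.pyRange 0 (PySem.List.len (q :: qs)) 1).map
        (fun i => (PySem.List.pyGetD (q :: qs) i ("", "")).1)).Nodup := by
      have hcomp : (PySem.List.pyRange 0 (PySem.List.len (q :: qs)) 1).map
          (fun i => (PySem.List.pyGetD (q :: qs) i ("", "")).1)
          = ((PySem.List.pyRange 0 (PySem.List.len (q :: qs)) 1).map
              (fun i => PySem.List.pyGetD (q :: qs) i ("", ""))).map (fun p => p.1) := by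
        simp [List.map_map]
      rw [hcomp, PySem.List.map_pyGetD_pyRange_zero]
      exact hnd
    rw [PySem.Dict.items_foldl_insert_fresh _ _
        (fun i => [("start", (PySem.List.pyGetD (q :: qs) i ("", "")).2),
          ("end", if i < PySem.List.len (q :: qs) - 1 then
                    (PySem.List.pyGetD (q :: qs) (i + 1) ("", "")).2
                  else
                    PySem.Str.replace (PySem.List.pyGetD (q :: qs) 0 ("", "")).2 "2024" "2025")])
        PySem.Dict.empty hfreshA hknodA]
    -- B side: the reverse foldl is a foldr, which builds pvPW reversed
    dsimp only
    rw [List.foldl_reverse]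
    have hb := foldr_eq_pw (q :: qs) (PySem.Str.replace q.2 "2024" "2025")
    have hbsnd := congrArg Prod.snd hb
    dsimp only at hbsnd ⊢
    rw [hbsnd, List.reverse_reverse,
      items_ofList_of_nodup _ (by rw [pvPW_map_fst]; exact hnd)]
    simpa [PySem.Dict.empty] using mapA_eq_pw q qs
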